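-- pv_equiv track=rewrite | github.com/Thernn88/SAPPHYRE | MergeOverlap.py | calculate_split
-- ===== SOURCE A (Python) =====
-- from typing import Union
--
-- def get_start_end(sequence: str) -> tuple:
--     """
--     Returns index of first and last none dash character in sequence.
--     """
--     start = None
--     end = None
--     for i, character in enumerate(sequence):
--         if character != "-":
--             start = i
--             break
--     for i in range(len(sequence) - 1, -1, -1):
--         if sequence[i] != "-":
--             end = i
--             break
--     return (start, end)
--
-- def find_overlap(tuple_a: tuple, tuple_b: tuple) -> Union[tuple, None]:
--     """
--     Takes two start/end pairs and returns the overlap.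
--     """
--     start = max(tuple_a[0], tuple_b[0])
--     end = min(tuple_a[1], tuple_b[1])
--     if end - start < 0:
--         return None
--     return start, end
--
-- def calculate_split(sequence_a: str, sequence_b: str, comparison_sequence: str) -> int:
--     """
--     Iterates over each position in the overlap range of sequence A and sequence B and
--     creates a frankenstein sequence of sequence A + Sequence B joined at each
--     position in the overlap.
--
--     Final split position = pos in overlap with highest score.
--
--     Score is determined by the amount of characters that are the same between each
--     position in the frankenstein sequence and the comparison sequence.
--     """
--
--     pair_a = get_start_end(sequence_a)
--     pair_b = get_start_end(sequence_b)
--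
--     overlap_start, overlap_end = find_overlap(pair_a, pair_b)
--
--     sequence_a_overlap = sequence_a[overlap_start : overlap_end + 1]
--     sequence_b_overlap = sequence_b[overlap_start : overlap_end + 1]
--     comparison_overlap = comparison_sequence[overlap_start : overlap_end + 1]
--
--     highest_score = 0
--     base_score = 0
--     highest_scoring_pos = 0
--
--     for i, character in enumerate(sequence_b_overlap):
--         if character == comparison_overlap[i]:
--             base_score += 1
--     highest_score = base_score
--
--     for i, character_a in enumerate(sequence_a_overlap):
--         if sequence_b_overlap[i] == comparison_overlap[i]:
--             base_score -= 1
--         if character_a == comparison_overlap[i]: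
--             base_score += 1
--         if base_score >= highest_score:
--             highest_score = base_score
--             highest_scoring_pos = i
--     return highest_scoring_pos + overlap_start
-- ===== SOURCE B (Python) =====
-- from typing import Union
--
-- def get_start_end(sequence: str) -> tuple:
--     """
--     Returns index of first and last none dash character in sequence.
--     """
--     start = None
--     end = None
--     for i, character in enumerate(sequence):
--         if character != "-":
--             start = i
--             break
--     for i in range(len(sequence) - 1, -1, -1):
--         if sequence[i] != "-":
--             end = i
--             break
--     return (start, end)
--
-- def find_overlap(tuple_a: tuple, tuple_b: tuple) -> Union[tuple, None]:
--     """
--     Takes two start/end pairs and returns the overlap.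
--     """
--     start = max(tuple_a[0], tuple_b[0])
--     end = min(tuple_a[1], tuple_b[1])
--     if end - start < 0:
--         return None
--     return start, end
--
-- def calculate_split(sequence_a: str, sequence_b: str, comparison_sequence: str) -> int:
--     """
--     Table-based variant: build prefix match counts for A and suffix match
--     counts for B over the overlap, then pick the last position whose
--     score (A-matches up to it + B-matches after it) reaches the running best,
--     starting from the full-B baseline at position 0.
--     """
--     pair_a = get_start_end(sequence_a)
--     pair_b = get_start_end(sequence_b)
--
--     overlap_start, overlap_end = find_overlap(pair_a, pair_b)
--
--     ao = sequence_a[overlap_start : overlap_end + 1]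
--     bo = sequence_b[overlap_start : overlap_end + 1]
--     co = comparison_sequence[overlap_start : overlap_end + 1]
--
--     # prefix_a[i] = number of matching positions of ao against co in 0..i
--     prefix_a = []
--     total = 0
--     for x, y in zip(ao, co):
--         total += x == y
--         prefix_a.append(total)
--
--     # suffix_b[i] = number of matching positions of bo against co in i..end
--     # (built back to front; suffix_b has one extra trailing 0)
--     suffix_b = [0]
--     total = 0
--     for x, y in reversed(list(zip(bo, co))):
--         total += x == y
--         suffix_b.append(total)
--     suffix_b.reverse()
--
--     best = suffix_b[0]
--     best_pos = 0
--     for i, (p, s) in enumerate(zip(prefix_a, suffix_b[1:])):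
--         if p + s >= best:
--             best = p + s
--             best_pos = i
--     return best_pos + overlap_start
-- ===== Notes on version B (the rewrite author's own statement) =====
-- stated objective: alternative
-- what changed: Replaces A's single incremental scan (a running base score updated in place while selecting) by a table-based decomposition: build prefix match counts for A and suffix match counts for B over the overlap in two passes, then a separate selection pass over precomputed scores prefix[i]+suffix[i+1].
import Mathlib
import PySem

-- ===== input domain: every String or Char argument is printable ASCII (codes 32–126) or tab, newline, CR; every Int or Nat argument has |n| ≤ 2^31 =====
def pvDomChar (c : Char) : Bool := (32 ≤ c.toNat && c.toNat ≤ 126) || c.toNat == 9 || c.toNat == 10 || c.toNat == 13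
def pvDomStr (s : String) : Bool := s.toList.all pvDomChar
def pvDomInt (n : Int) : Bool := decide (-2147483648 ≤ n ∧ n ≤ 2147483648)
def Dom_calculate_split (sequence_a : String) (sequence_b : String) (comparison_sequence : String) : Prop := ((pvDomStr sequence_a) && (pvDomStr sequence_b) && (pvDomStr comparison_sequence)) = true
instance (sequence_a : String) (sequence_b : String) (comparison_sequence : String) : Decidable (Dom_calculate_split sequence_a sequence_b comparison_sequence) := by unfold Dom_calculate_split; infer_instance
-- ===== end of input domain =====

-- B replaces A's single incremental best-score scan by two match-count table passes plus a
-- separate selection pass over precomputed scores (objective: alternative decomposition, same cost).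

-- ===== PORT A =====
-- get_start_end, first loop: 'for i, character in enumerate(sequence): if character != "-": start = i; break'
def pvFirstLoop : List (Int × Char) → Option Int
  | [] => none
  | (i, c) :: rest => if c ≠ '-' then some i else pvFirstLoop rest

-- get_start_end, second loop: 'for i in range(len(sequence)-1, -1, -1): if sequence[i] != "-": end = i; break'
def pvLastLoop (l : List Char) : List Int → Option Int
  | [] => none
  | i :: rest =>
    match PySem.List.pyGet? l i with
    | some c => if c ≠ '-' then some i else pvLastLoop l rest
    | none => none  -- IndexError; unreachable: i comes from range(len-1,-1,-1)

def pvGetStartEnd (s : String) : Option Int × Option Int :=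
  let l := s.toList
  (pvFirstLoop (PySem.List.enumerate l 0),
   pvLastLoop l (PySem.List.pyRange ((l.length : Int) - 1) (-1) (-1)))

-- find_overlap; 'none' marks Python raising TypeError (max/min on None) or returning None; excluded by Pre_
def pvFindOverlap (ta tb : Option Int × Option Int) : Option (Int × Int) :=
  match ta.1, tb.1, ta.2, tb.2 with
  | some a1, some b1, some a2, some b2 =>
    let start := max a1 b1
    let stop := min a2 b2
    if stop - start < 0 then none else some (start, stop)
  | _, _, _, _ => none

-- 'l1[i] == l2[i]'; false where Python would raise IndexError (unreachable under Pre_)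
def pvEqIdx (l1 l2 : List Char) (i : Int) : Bool :=
  match PySem.List.pyGet? l1 i, PySem.List.pyGet? l2 i with
  | some x, some y => x == y
  | _, _ => false

-- 'c == l[i]'; false where Python would raise IndexError (unreachable under Pre_)
def pvEqAt (c : Char) (l : List Char) (i : Int) : Bool :=
  match PySem.List.pyGet? l i with
  | some y => c == y
  | none => false

def calculate_split (sequence_a : String) (sequence_b : String) (comparison_sequence : String) : Int :=
  match pvFindOverlap (pvGetStartEnd sequence_a) (pvGetStartEnd sequence_b) with
  | none => 0  -- Python raises here (TypeError); excluded by Pre_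
  | some (os, oe) =>
    let ao := PySem.List.slice sequence_a.toList (some os) (some (oe + 1))
    let bo := PySem.List.slice sequence_b.toList (some os) (some (oe + 1))
    let co := PySem.List.slice comparison_sequence.toList (some os) (some (oe + 1))
    let base := (PySem.List.enumerate bo 0).foldl
      (fun acc p => if pvEqAt p.2 co p.1 then acc + 1 else acc) (0 : Int)
    let st := (PySem.List.enumerate ao 0).foldl
      (fun (st : Int × Int × Int) p =>
        let b1 := if pvEqIdx bo co p.1 then st.1 - 1 else st.1
        let b2 := if pvEqAt p.2 co p.1 then b1 + 1 else b1
        if b2 ≥ st.2.1 then (b2, b2, p.1) else (b2, st.2.1, st.2.2))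
      (base, base, (0 : Int))
    st.2.2 + os

-- ===== PORT B =====
def calculate_split_alt (sequence_a : String) (sequence_b : String) (comparison_sequence : String) : Int :=
  match pvFindOverlap (pvGetStartEnd sequence_a) (pvGetStartEnd sequence_b) with
  | none => 0  -- Python raises here (TypeError); excluded by Pre_
  | some (os, oe) =>
    let ao := PySem.List.slice sequence_a.toList (some os) (some (oe + 1))
    let bo := PySem.List.slice sequence_b.toList (some os) (some (oe + 1))
    let co := PySem.List.slice comparison_sequence.toList (some os) (some (oe + 1))
    let prefA := ((ao.zip co).foldl
      (fun (st : Int × List Int) p =>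
        let t := st.1 + (if p.1 == p.2 then (1 : Int) else 0)
        (t, st.2 ++ [t])) ((0 : Int), ([] : List Int))).2
    let sufB := (((bo.zip co).reverse.foldl
      (fun (st : Int × List Int) p =>
        let t := st.1 + (if p.1 == p.2 then (1 : Int) else 0)
        (t, st.2 ++ [t])) ((0 : Int), [(0 : Int)])).2).reverse
    let best0 := PySem.List.pyGetD sufB 0 0
    let sel := (PySem.List.enumerate (prefA.zip (PySem.List.slice sufB (some 1) none)) 0).foldl
      (fun (st : Int × Int) q =>
        if q.2.1 + q.2.2 ≥ st.1 then (q.2.1 + q.2.2, q.1) else st)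
      (best0, (0 : Int))
    sel.2 + os

-- ===== PRECONDITION & SPEC =====
-- Pre_ excludes exactly the inputs where Python A raises: an all-dash/empty sequence_a or sequence_b
-- (TypeError in find_overlap), an empty overlap (TypeError unpacking None), or a comparison_sequence
-- shorter than the overlap end (IndexError).
def Pre_calculate_split (sequence_a : String) (sequence_b : String) (comparison_sequence : String) : Prop :=
  let la := sequence_a.toList
  let lb := sequence_b.toList
  let p : Char → Bool := fun ch => ch != '-'
  la.any p = true ∧ lb.any p = true ∧
  max (la.findIdx p) (lb.findIdx p)
    ≤ min (la.length - 1 - la.reverse.findIdx p) (lb.length - 1 - lb.reverse.findIdx p) ∧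
  min (la.length - 1 - la.reverse.findIdx p) (lb.length - 1 - lb.reverse.findIdx p) + 1
    ≤ comparison_sequence.toList.length
instance (sequence_a : String) (sequence_b : String) (comparison_sequence : String) : Decidable (Pre_calculate_split sequence_a sequence_b comparison_sequence) := by unfold Pre_calculate_split; infer_instance

def pvWitness_calculate_split : String × String × String := ("A", "A", "A")

def Spec_calculate_split (sequence_a : String) (sequence_b : String) (comparison_sequence : String) (out : Int) : Prop := out = calculate_split_alt sequence_a sequence_b comparison_sequence
instance (sequence_a : String) (sequence_b : String) (comparison_sequence : String) (out : Int) : Decidable (Spec_calculate_split sequence_a sequence_b comparison_sequence out) := by unfold Spec_calculate_split; infer_instance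

-- ===== CLAIM (what is proved, stated in full; the proofs are below) =====
def Claim_equal_calculate_split : Prop := ∀ (sequence_a : String) (sequence_b : String) (comparison_sequence : String), Dom_calculate_split sequence_a sequence_b comparison_sequence → Pre_calculate_split sequence_a sequence_b comparison_sequence → Spec_calculate_split sequence_a sequence_b comparison_sequence (calculate_split sequence_a sequence_b comparison_sequence)

-- ===== LEMMAS AND PROOFS =====

-- proof-side reference functions
def pvMI (p : Char × Char) : Int := if p.1 == p.2 then 1 else 0

def pvCnt : List (Char × Char) → Int
  | [] => 0
  | q :: r => pvMI q + pvCnt r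

def pvPrefL : List (Char × Char) → Int → List Int
  | [], _ => []
  | q :: r, t => (t + pvMI q) :: pvPrefL r (t + pvMI q)

def pvSufL : List (Char × Char) → List Int
  | [] => [0]
  | q :: r => (pvMI q + pvCnt r) :: pvSufL r

def pvRef : List (Int × Int) → Int → Int → Int
  | [], _, pos => pos
  | (i, x) :: r, best, pos => if x ≥ best then pvRef r x i else pvRef r best pos

def pvScores : List ((Char × Char) × (Char × Char)) → Int → Int → List (Int × Int)
  | [], _, _ => []
  | w :: r, k, base =>
    let b1 := if w.2.1 == w.2.2 then base - 1 else base
    let b2 := if w.1.1 == w.1.2 then b1 + 1 else b1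
    (k, b2) :: pvScores r (k + 1) b2

def pvAfoldZ : List ((Char × Char) × (Char × Char)) → Int → Int × Int × Int → Int
  | [], _, st => st.2.2
  | w :: r, k, st =>
    let b1 := if w.2.1 == w.2.2 then st.1 - 1 else st.1
    let b2 := if w.1.1 == w.1.2 then b1 + 1 else b1
    if b2 ≥ st.2.1 then pvAfoldZ r (k + 1) (b2, b2, k) else pvAfoldZ r (k + 1) (b2, st.2.1, st.2.2)

theorem pv_first_eq (l : List Char) (k : Int) :
    pvFirstLoop (PySem.List.enumerate l k) =
      (l.findIdx? (fun ch => ch != '-')).map (fun j => k + (j : Int)) := by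
  induction l generalizing k with
  | nil => simp [pvFirstLoop, PySem.List.enumerate_nil]
  | cons c r ih =>
    rw [PySem.List.enumerate_cons]
    by_cases hc : c = '-'
    · subst hc
      simp only [pvFirstLoop, List.findIdx?_cons]
      simp [ih (k + 1)]
      cases List.findIdx? (fun ch => ch != '-') r <;> simp
      omega
    · simp [pvFirstLoop, List.findIdx?_cons, hc]

theorem pv_last_eq (l : List Char) : ∀ (k : Nat), k < l.length →
    pvLastLoop l (PySem.List.pyRange (k : Int) (-1) (-1)) =
      ((l.take (k+1)).reverse.findIdx? (fun ch => ch != '-')).map (fun j => (k : Int) - (j : Int)) := by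
  intro k
  induction k with
  | zero =>
    intro hk
    rw [PySem.List.pyRange_neg_one_cons (by omega)]
    have h0 : PySem.List.pyGet? l ((0:Nat):Int) = some l[0] := by
      rw [PySem.List.pyGet?_natCast]; simp [List.getElem?_eq_getElem hk]
    have htake : (l.take 1).reverse = [l[0]] := by
      rw [List.take_add_one]
      simp [List.getElem?_eq_getElem hk]
    rw [htake]
    push_cast at h0 ⊢
    by_cases hc : l[0] = '-'
    · simp [pvLastLoop, h0, hc, List.findIdx?_cons]
    · simp only [pvLastLoop, h0, List.findIdx?_cons]
      rw [if_pos (by simp [hc] : (l[0] != '-') = true)]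
      simp [hc]
  | succ m ih =>
    intro hk
    rw [PySem.List.pyRange_neg_one_cons (by omega)]
    have h0 : PySem.List.pyGet? l (((m+1:Nat)):Int) = some l[m+1] := by
      rw [PySem.List.pyGet?_natCast]; simp [List.getElem?_eq_getElem hk]
    have htake : (l.take (m+1+1)).reverse = l[m+1] :: (l.take (m+1)).reverse := by
      rw [List.take_add_one]
      simp [List.getElem?_eq_getElem hk]
    rw [htake]
    push_cast at h0 ⊢
    by_cases hc : l[m+1] = '-'
    · have hcast : ((m:Nat) : Int) + 1 - 1 = ((m:Nat) : Int) := by ring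
      simp only [pvLastLoop, h0, hc]
      rw [if_neg (by simp), hcast, ih (by omega)]
      simp [List.findIdx?_cons]
      cases List.findIdx? (fun ch => ch != '-') (l.take (m+1)).reverse <;> simp

    · simp only [pvLastLoop, h0, List.findIdx?_cons]
      rw [if_pos (by simp [hc] : (l[m+1] != '-') = true)]
      simp [hc]

theorem pv_refA (W : List ((Char × Char) × (Char × Char))) : ∀ (k base best pos : Int),
    pvAfoldZ W k (base, best, pos) = pvRef (pvScores W k base) best pos := by
  induction W with
  | nil => intro k base best pos; rfl
  | cons w r ih =>
    intro k base best pos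
    simp only [pvAfoldZ, pvScores, pvRef]
    split_ifs <;> apply ih

theorem pv_refB (L : List (Int × (Int × Int))) : ∀ (best pos : Int),
    (L.foldl (fun (st : Int × Int) q =>
        if q.2.1 + q.2.2 ≥ st.1 then (q.2.1 + q.2.2, q.1) else st) (best, pos)).2
      = pvRef (L.map (fun q => (q.1, q.2.1 + q.2.2))) best pos := by
  induction L with
  | nil => intro best pos; rfl
  | cons q r ih =>
    intro best pos
    simp only [List.foldl_cons, List.map_cons, pvRef]
    split_ifs <;> apply ih

theorem pv_pref_eq (pz : List (Char × Char)) : ∀ (t : Int) (acc : List Int),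
    pz.foldl (fun (st : Int × List Int) p =>
        let v := st.1 + (if p.1 == p.2 then (1 : Int) else 0)
        (v, st.2 ++ [v])) (t, acc)
      = (t + pvCnt pz, acc ++ pvPrefL pz t) := by
  induction pz with
  | nil => intro t acc; simp [pvCnt, pvPrefL]
  | cons p r ih =>
    intro t acc
    simp only [List.foldl_cons]
    rw [ih]
    simp [pvCnt, pvPrefL, pvMI, add_assoc]

theorem pv_suf_eq (qz : List (Char × Char)) :
    qz.reverse.foldl (fun (st : Int × List Int) p =>
        let v := st.1 + (if p.1 == p.2 then (1 : Int) else 0)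
        (v, st.2 ++ [v])) ((0 : Int), [(0 : Int)])
      = (pvCnt qz, (pvSufL qz).reverse) := by
  induction qz with
  | nil => rfl
  | cons q r ih =>
    rw [List.reverse_cons, List.foldl_append, ih]
    simp [pvCnt, pvSufL, pvMI, add_comm]

theorem pv_sufL_cons (qz : List (Char × Char)) :
    pvSufL qz = pvCnt qz :: (pvSufL qz).tail := by
  cases qz <;> simp [pvSufL, pvCnt]

theorem pv_scores_eq : ∀ (pz qz : List (Char × Char)) (t k : Int),
    pz.length = qz.length →
    pvScores (pz.zip qz) k (t + pvCnt qz)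
      = (PySem.List.enumerate ((pvPrefL pz t).zip ((pvSufL qz).tail)) k).map
          (fun q => (q.1, q.2.1 + q.2.2)) := by
  intro pz
  induction pz with
  | nil =>
    intro qz t k h
    rfl
  | cons p pr ih =>
    intro qz t k h
    cases qz with
    | nil => simp at h
    | cons q qr =>
      simp only [List.zip_cons_cons, pvScores, pvPrefL]
      have hb2 : (if p.1 == p.2 then (if q.1 == q.2 then (t + pvCnt (q :: qr)) - 1 else (t + pvCnt (q :: qr))) + 1
            else (if q.1 == q.2 then (t + pvCnt (q :: qr)) - 1 else (t + pvCnt (q :: qr))))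
          = (t + pvMI p) + pvCnt qr := by
        simp only [pvCnt, pvMI]
        split_ifs <;> ring
      rw [hb2]
      conv_rhs => rw [pvSufL]
      simp only [List.tail_cons]
      rw [pv_sufL_cons qr, List.zip_cons_cons, PySem.List.enumerate_cons, List.map_cons]
      congr 1
      exact ih qr (t + pvMI p) (k + 1) (by simpa using h)

theorem pv_drop_facts {α : Type} (l : List α) (k : Nat) (x : α) (r : List α)
    (h : l.drop k = x :: r) :
    PySem.List.pyGet? l (k : Int) = some x ∧ l.drop (k + 1) = r := by
  constructor
  · rw [PySem.List.pyGet?_natCast]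
    have : (l.drop k)[0]? = some x := by rw [h]; rfl
    rwa [List.getElem?_drop, Nat.add_zero] at this
  · have : (l.drop k).drop 1 = r := by rw [h]; rfl
    rwa [List.drop_drop] at this

theorem pv_base_eq (co : List Char) : ∀ (boS coS : List Char) (k : Nat) (acc : Int),
    co.drop k = coS → boS.length = coS.length →
    (PySem.List.enumerate boS (k : Int)).foldl
        (fun acc p => if pvEqAt p.2 co p.1 then acc + 1 else acc) acc
      = acc + pvCnt (boS.zip coS) := by
  intro boS
  induction boS with
  | nil => intro coS k acc _ _; simp [PySem.List.enumerate_nil, pvCnt]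
  | cons b0 boR ih =>
    intro coS k acc hdrop hlen
    cases coS with
    | nil => simp at hlen
    | cons c0 coR =>
      obtain ⟨hget, hdrop'⟩ := pv_drop_facts co k c0 coR hdrop
      rw [PySem.List.enumerate_cons, List.foldl_cons]
      have heq : pvEqAt b0 co (k : Int) = (b0 == c0) := by
        simp [pvEqAt, hget]
      have hcast : ((k : Nat) : Int) + 1 = (((k+1) : Nat) : Int) := by push_cast; ring
      rw [heq, hcast, ih coR (k+1) _ hdrop' (by simpa using hlen)]
      simp only [List.zip_cons_cons, pvCnt, pvMI]
      split_ifs <;> ring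

theorem pv_mainA_eq (bo co : List Char) : ∀ (aoS boS coS : List Char) (k : Nat) (st : Int × Int × Int),
    bo.drop k = boS → co.drop k = coS → aoS.length = boS.length → boS.length = coS.length →
    ((PySem.List.enumerate aoS (k : Int)).foldl
        (fun (st : Int × Int × Int) p =>
          let b1 := if pvEqIdx bo co p.1 then st.1 - 1 else st.1
          let b2 := if pvEqAt p.2 co p.1 then b1 + 1 else b1
          if b2 ≥ st.2.1 then (b2, b2, p.1) else (b2, st.2.1, st.2.2)) st).2.2
      = pvAfoldZ ((aoS.zip coS).zip (boS.zip coS)) (k : Int) st := by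
  intro aoS
  induction aoS with
  | nil => intro boS coS k st _ _ _ _; simp [PySem.List.enumerate_nil, pvAfoldZ]
  | cons a0 aoR ih =>
    intro boS coS k st hdb hdc hl1 hl2
    cases boS with
    | nil => simp at hl1
    | cons b0 boR =>
      cases coS with
      | nil => simp at hl2
      | cons c0 coR =>
        obtain ⟨hgb, hdb'⟩ := pv_drop_facts bo k b0 boR hdb
        obtain ⟨hgc, hdc'⟩ := pv_drop_facts co k c0 coR hdc
        rw [PySem.List.enumerate_cons, List.foldl_cons]
        have he1 : pvEqIdx bo co (k : Int) = (b0 == c0) := by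
          simp [pvEqIdx, hgb, hgc]
        have he2 : pvEqAt a0 co (k : Int) = (a0 == c0) := by
          simp [pvEqAt, hgc]
        simp only [List.zip_cons_cons, pvAfoldZ, he1, he2]
        have hcast : ((k : Nat) : Int) + 1 = (((k+1) : Nat) : Int) := by push_cast; ring
        rw [hcast]
        split_ifs <;>
          exact ih boR coR (k+1) _ hdb' hdc' (by simpa using hl1) (by simpa using hl2)

-- the core: A's scan equals B's table-based selection on equal-length overlap lists
theorem pv_core (ao bo co : List Char) (h1 : ao.length = bo.length) (h2 : bo.length = co.length) :
    ((PySem.List.enumerate ao 0).foldl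
        (fun (st : Int × Int × Int) p =>
          let b1 := if pvEqIdx bo co p.1 then st.1 - 1 else st.1
          let b2 := if pvEqAt p.2 co p.1 then b1 + 1 else b1
          if b2 ≥ st.2.1 then (b2, b2, p.1) else (b2, st.2.1, st.2.2))
        (((PySem.List.enumerate bo 0).foldl
            (fun acc p => if pvEqAt p.2 co p.1 then acc + 1 else acc) (0 : Int)),
         ((PySem.List.enumerate bo 0).foldl
            (fun acc p => if pvEqAt p.2 co p.1 then acc + 1 else acc) (0 : Int)), (0 : Int))).2.2
      = (let prefA := ((ao.zip co).foldl
            (fun (st : Int × List Int) p =>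
              let t := st.1 + (if p.1 == p.2 then (1 : Int) else 0)
              (t, st.2 ++ [t])) ((0 : Int), ([] : List Int))).2
         let sufB := (((bo.zip co).reverse.foldl
            (fun (st : Int × List Int) p =>
              let t := st.1 + (if p.1 == p.2 then (1 : Int) else 0)
              (t, st.2 ++ [t])) ((0 : Int), [(0 : Int)])).2).reverse
         let best0 := PySem.List.pyGetD sufB 0 0
         ((PySem.List.enumerate (prefA.zip (PySem.List.slice sufB (some 1) none)) 0).foldl
            (fun (st : Int × Int) q =>
              if q.2.1 + q.2.2 ≥ st.1 then (q.2.1 + q.2.2, q.1) else st)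
            (best0, (0 : Int))).2) := by
  have hz1 : (ao.zip co).length = (bo.zip co).length := by
    simp [List.length_zip, h1, h2]
  have hbase : (PySem.List.enumerate bo (0:Int)).foldl
      (fun acc p => if pvEqAt p.2 co p.1 then acc + 1 else acc) (0:Int) = pvCnt (bo.zip co) := by
    have := pv_base_eq co bo co 0 0 rfl h2
    simpa using this
  rw [hbase]
  have hA := pv_mainA_eq bo co ao bo co 0 (pvCnt (bo.zip co), pvCnt (bo.zip co), 0) rfl rfl h1 h2
  push_cast at hA
  rw [hA, pv_refA]
  have hbest : PySem.List.pyGetD (pvSufL (bo.zip co)) 0 0 = pvCnt (bo.zip co) := by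
    rw [pv_sufL_cons (bo.zip co)]
    exact PySem.List.pyGetD_zero_cons _ _ _
  have hsuf2 : ([(0:Int)] ++ pvPrefL (bo.zip co).reverse 0).reverse = pvSufL (bo.zip co) := by
    have ha := pv_suf_eq (bo.zip co)
    rw [pv_pref_eq (bo.zip co).reverse 0 [0]] at ha
    have hb := congrArg Prod.snd ha
    simp only at hb
    rw [hb, List.reverse_reverse]
  have hsc := pv_scores_eq (ao.zip co) (bo.zip co) 0 0 hz1
  rw [zero_add] at hsc
  simp only [pv_pref_eq, List.nil_append, hsuf2, hbest, PySem.List.slice_from_one]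
  rw [pv_refB, ← hsc]

-- ===== VERDICT (by name: the statement is the Claim_ definition above) =====
theorem pv_findIdx_some (l : List Char) (h : l.any (fun ch => ch != '-') = true) :
    l.findIdx? (fun ch => ch != '-') = some (l.findIdx (fun ch => ch != '-')) ∧
    l.findIdx (fun ch => ch != '-') < l.length := by
  have hs : (l.findIdx? (fun ch => ch != '-')).isSome := by
    rw [List.findIdx?_isSome]; exact h
  obtain ⟨i, hi⟩ := Option.isSome_iff_exists.mp hs
  obtain ⟨hlt, hfe⟩ := List.findIdx?_eq_some_iff_findIdx_eq.mp hi
  subst hfe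
  exact ⟨hi, hlt⟩

theorem pv_gse_eq (s : String) (h : s.toList.any (fun ch => ch != '-') = true) :
    pvGetStartEnd s =
      (some ((s.toList.findIdx (fun ch => ch != '-') : Nat) : Int),
       some ((s.toList.length - 1 - s.toList.reverse.findIdx (fun ch => ch != '-') : Nat) : Int)) := by
  obtain ⟨hf, hflt⟩ := pv_findIdx_some s.toList h
  obtain ⟨hr, hrlt⟩ := pv_findIdx_some s.toList.reverse (by simpa using h)
  have hlen : 1 ≤ s.toList.length := by
    cases hl : s.toList with
    | nil => rw [hl] at h; simp at h
    | cons x xs => simp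
  unfold pvGetStartEnd
  refine Prod.ext ?_ ?_
  · show pvFirstLoop _ = _
    rw [pv_first_eq, hf]
    simp
  · show pvLastLoop _ _ = _
    have hc1 : ((s.toList.length : Nat) : Int) - 1 = (((s.toList.length - 1 : Nat)) : Int) := by omega
    rw [hc1, pv_last_eq s.toList (s.toList.length - 1) (by omega)]
    rw [Nat.sub_add_cancel hlen, List.take_length, hr]
    rw [List.length_reverse] at hrlt
    rw [Nat.cast_sub (by omega : List.findIdx (fun ch => ch != '-') s.toList.reverse ≤ s.toList.length - 1)]
    simp

theorem calculate_split_spec : Claim_equal_calculate_split := by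
  intro a b c _ hpre
  unfold Spec_calculate_split
  simp only [Pre_calculate_split] at hpre
  obtain ⟨hA, hB, hge, hcl⟩ := hpre
  have hga := pv_gse_eq a hA
  have hgb := pv_gse_eq b hB
  obtain ⟨_, hfalt⟩ := pv_findIdx_some a.toList hA
  obtain ⟨_, hfblt⟩ := pv_findIdx_some b.toList hB
  obtain ⟨_, hralt⟩ := pv_findIdx_some a.toList.reverse (by simpa using hA)
  obtain ⟨_, hrblt⟩ := pv_findIdx_some b.toList.reverse (by simpa using hB)
  rw [List.length_reverse] at hralt hrblt
  set la := a.toList with hla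
  set lb := b.toList with hlb
  set lc := c.toList with hlc
  set fa := la.findIdx (fun ch => ch != '-') with hfa
  set fb := lb.findIdx (fun ch => ch != '-') with hfb
  set ea := la.length - 1 - la.reverse.findIdx (fun ch => ch != '-') with hea
  set eb := lb.length - 1 - lb.reverse.findIdx (fun ch => ch != '-') with heb
  have hov : pvFindOverlap (pvGetStartEnd a) (pvGetStartEnd b)
      = some (((max fa fb : Nat) : Int), ((min ea eb : Nat) : Int)) := by
    rw [hga, hgb]
    show (if _ then _ else _) = _
    rw [if_neg (by omega)]
    refine congrArg some (Prod.ext ?_ ?_) <;> · show _ = _; push_cast; omega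
  have hcast : (((min ea eb : Nat) : Int) + 1) = (((min ea eb + 1 : Nat)) : Int) := by omega
  have hlen : ∀ (l : List Char), min ea eb + 1 ≤ l.length →
      (PySem.List.slice l (some ((max fa fb : Nat) : Int)) (some (((min ea eb : Nat) : Int) + 1))).length
        = min ea eb + 1 - max fa fb := by
    intro l hl
    rw [hcast, PySem.List.slice_natCast]
    simp only [List.length_take, List.length_drop]
    omega
  have hna : min ea eb + 1 ≤ la.length := by omega
  have hnb : min ea eb + 1 ≤ lb.length := by omega
  have hnc : min ea eb + 1 ≤ lc.length := hcl
  have key := pv_core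
    (PySem.List.slice la (some ((max fa fb : Nat) : Int)) (some (((min ea eb : Nat) : Int) + 1)))
    (PySem.List.slice lb (some ((max fa fb : Nat) : Int)) (some (((min ea eb : Nat) : Int) + 1)))
    (PySem.List.slice lc (some ((max fa fb : Nat) : Int)) (some (((min ea eb : Nat) : Int) + 1)))
    (by rw [hlen la hna, hlen lb hnb]) (by rw [hlen lb hnb, hlen lc hnc])
  unfold calculate_split calculate_split_alt
  rw [hov, ← hla, ← hlb, ← hlc]
  exact congrArg (fun z => z + ((max fa fb : Nat) : Int)) key
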